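-- pv_equiv track=rewrite | github.com/jaguuai/leetcode.com | 6.Zigzag Conversion/main.py | convert
-- ===== SOURCE A (Python) =====
-- def convert(s: str, numRows: int) -> str:
--     # If there is only one row or the string is too short, return it directly
--     if numRows == 1 or numRows >= len(s):
--         return s
--
--     # Create a list with numRows empty rows
--     rows = [''] * numRows
--     index = 0
--     step = 1
--
--     # Iterate over all characters
--     for char in s:
--         rows[index] += char
--
--         # Update the index and direction
--         if index == 0:
--             step = 1
--         elif index == numRows - 1:
--             step = -1
--
--         index += step
--
--     # Join all rows and return the result
--     return ''.join(rows)
-- ===== SOURCE B (Python) =====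
-- def convert(s: str, numRows: int) -> str:
--     # Row-by-row arithmetic walk over the zigzag cycle instead of simulating the bounce.
--     if numRows == 1 or numRows >= len(s):
--         return s
--     n = len(s)
--     cycle = 2 * numRows - 2
--     chars = []
--     for r in range(numRows):
--         for j in range(r, n, cycle):
--             chars.append(s[j])
--             d = j + cycle - 2 * r
--             if 0 < r < numRows - 1 and d < n:
--                 chars.append(s[d])
--     return ''.join(chars)
-- ===== Notes on version B (the rewrite author's own statement) =====
-- stated objective: alternative
-- what changed: Replaces the bouncing row-index simulation (mutable rows list, direction flips) with a direct row-by-row arithmetic walk: for each row r, pick characters at positions r, r+cycle, ... plus the diagonal position j+cycle-2r for interior rows.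
import Mathlib
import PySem

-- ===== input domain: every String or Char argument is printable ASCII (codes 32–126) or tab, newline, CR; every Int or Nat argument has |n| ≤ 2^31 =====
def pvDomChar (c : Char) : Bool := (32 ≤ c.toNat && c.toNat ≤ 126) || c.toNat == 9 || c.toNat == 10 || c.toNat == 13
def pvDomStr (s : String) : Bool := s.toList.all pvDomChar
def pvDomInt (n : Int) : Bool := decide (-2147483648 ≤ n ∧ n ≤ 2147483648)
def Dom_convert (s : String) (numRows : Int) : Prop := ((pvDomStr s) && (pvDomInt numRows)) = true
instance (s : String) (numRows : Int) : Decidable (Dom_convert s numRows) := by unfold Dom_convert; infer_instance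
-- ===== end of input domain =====

-- B replaces A's bouncing row-index simulation by a per-row arithmetic walk over the zigzag cycle (alternative decomposition, same O(n)).

-- ===== PORT A =====
-- one simulation step: rows[index] += char; update step and index
def convertStep (numRows : Int) (st : List (List Char) × Int × Int) (c : Char) :
    List (List Char) × Int × Int :=
  let rows := PySem.List.pySetD st.1 st.2.1 (PySem.List.pyGetD st.1 st.2.1 [] ++ [c])
  let step := if st.2.1 == 0 then 1 else if st.2.1 == numRows - 1 then -1 else st.2.2
  (rows, st.2.1 + step, step)

def convert (s : String) (numRows : Int) : String :=
  if numRows == 1 || decide ((PySem.Str.len s : Int) ≤ numRows) then s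
  else
    let init : List (List Char) × Int × Int := (PySem.List.pyRepeat [([] : List Char)] numRows, 0, 1)
    let st := s.toList.foldl (convertStep numRows) init
    String.ofList st.1.flatten    -- ''.join(rows)

-- ===== PORT B =====
def convert_alt (s : String) (numRows : Int) : String :=
  if numRows == 1 || decide ((PySem.Str.len s : Int) ≤ numRows) then s
  else
    let cs := s.toList
    let n : Int := PySem.Str.len s
    let cycle : Int := 2 * numRows - 2
    let chars := (PySem.List.pyRange 0 numRows 1).foldl (fun acc r =>
      (PySem.List.pyRange r n cycle).foldl (fun acc j =>
        let acc := acc ++ [PySem.List.pyGetD cs j ' ']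
        let d := j + cycle - 2 * r
        if 0 < r ∧ r < numRows - 1 ∧ d < n then acc ++ [PySem.List.pyGetD cs d ' '] else acc)
        acc) ([] : List Char)
    String.ofList chars    -- ''.join(chars)

-- ===== PRECONDITION & SPEC =====
-- Pre_ excludes numRows ≤ 0 with a nonempty s, exactly where A raises IndexError (rows = [] there).
def Pre_convert (s : String) (numRows : Int) : Prop := 1 ≤ numRows ∨ s = ""
instance (s : String) (numRows : Int) : Decidable (Pre_convert s numRows) := by
  unfold Pre_convert; infer_instance

def pvWitness_convert : String × Int := ("PAYPALISHIRING", 3)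

def Spec_convert (s : String) (numRows : Int) (out : String) : Prop := out = convert_alt s numRows
instance (s : String) (numRows : Int) (out : String) : Decidable (Spec_convert s numRows out) := by
  unfold Spec_convert; infer_instance

-- ===== CLAIM (what is proved, stated in full; the proofs are below) =====
def Claim_equal_convert : Prop := ∀ (s : String) (numRows : Int), Dom_convert s numRows →
  Pre_convert s numRows → Spec_convert s numRows (convert s numRows)

-- ===== LEMMAS AND PROOFS =====

-- zigzag row of position j (2*R-2 is the cycle length)
def zigI (R j : Int) : Int :=
  if j % (2*R-2) < R then j % (2*R-2) else (2*R-2) - j % (2*R-2)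

-- direction stored by A's loop after processing position i
def TI (R i : Int) : Int := if i % (2*R-2) < R - 1 then 1 else -1

-- step value held by A's loop before processing position i
def SI (R i : Int) : Int := if i = 0 then 1 else TI R (i-1)

-- characters of l (starting at global position i) that land in row r
def rowsOf (R : Int) : List Char → Int → Int → List Char
  | [], _, _ => []
  | ch :: l, i, r => (if zigI R i = r then [ch] else []) ++ rowsOf R l (i+1) r

lemma emod_uniq (c a m q : Int) (h : a = c * q + m) (h0 : 0 ≤ m) (h1 : m < c) :
    a % c = m := by
  subst h
  have : c * q + m = m + c * q := by ring
  rw [this, Int.add_mul_emod_self_left, Int.emod_eq_of_lt h0 h1]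

lemma emod_succ_of (c a : Int) (h1 : a % c + 1 < c) (h0 : 0 ≤ a % c) :
    (a + 1) % c = a % c + 1 := by
  have h := Int.mul_ediv_add_emod a c
  exact emod_uniq c (a+1) (a % c + 1) (a / c) (by linarith) (by omega) h1

lemma emod_succ_wrap (c a : Int) (hc : 0 < c) (hm : a % c = c - 1) :
    (a + 1) % c = 0 := by
  have h := Int.mul_ediv_add_emod a c
  have hmul : c * (a / c + 1) = c * (a / c) + c := by ring
  exact emod_uniq c (a+1) 0 (a / c + 1) (by linarith) le_rfl hc

lemma emod_pred_of (c a : Int) (h1 : 1 ≤ a % c) (h2 : a % c < c) :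
    (a - 1) % c = a % c - 1 := by
  have h := Int.mul_ediv_add_emod a c
  exact emod_uniq c (a-1) (a % c - 1) (a / c) (by linarith) (by omega) (by omega)

lemma zig_bounds (R i : Int) (hR : 2 ≤ R) : 0 ≤ zigI R i ∧ zigI R i < R := by
  have h0 := Int.emod_nonneg i (show (2*R-2:Int) ≠ 0 by omega)
  have h1 := Int.emod_lt_of_pos i (show (0:Int) < 2*R-2 by omega)
  unfold zigI; split_ifs <;> omega

lemma zig_succ (R i : Int) (hR : 2 ≤ R) : zigI R (i+1) = zigI R i + TI R i := by
  have h0 := Int.emod_nonneg i (show (2*R-2:Int) ≠ 0 by omega)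
  have h1 := Int.emod_lt_of_pos i (show (0:Int) < 2*R-2 by omega)
  unfold zigI TI
  by_cases hw : i % (2*R-2) + 1 < 2*R-2
  · rw [emod_succ_of (2*R-2) i hw h0]
    split_ifs <;> omega
  · rw [emod_succ_wrap (2*R-2) i (by omega) (by omega)]
    split_ifs <;> omega

lemma step_upd (R i : Int) (hR : 2 ≤ R) (hi : 0 ≤ i) :
    (if zigI R i == 0 then (1:Int) else if zigI R i == R-1 then -1 else SI R i) = TI R i := by
  have h0 := Int.emod_nonneg i (show (2*R-2:Int) ≠ 0 by omega)
  have h1 := Int.emod_lt_of_pos i (show (0:Int) < 2*R-2 by omega)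
  simp only [beq_iff_eq]
  by_cases hz0 : zigI R i = 0
  · have hm0 : i % (2*R-2) = 0 := by unfold zigI at hz0; split_ifs at hz0 <;> omega
    rw [if_pos hz0]; unfold TI; rw [hm0]; split_ifs <;> omega
  · by_cases hzR : zigI R i = R - 1
    · have hm : i % (2*R-2) = R - 1 := by unfold zigI at hzR; split_ifs at hzR <;> omega
      rw [if_neg hz0, if_pos hzR]; unfold TI; rw [hm]; split_ifs <;> omega
    · have hne : i % (2*R-2) ≠ 0 := by
        intro h; apply hz0; unfold zigI; rw [h]; split_ifs <;> omega
      have hm0 : 1 ≤ i % (2*R-2) := by omega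
      have hmR : i % (2*R-2) ≠ R - 1 := by
        intro h; apply hzR; unfold zigI; rw [h]; split_ifs with hh <;> omega
      have hine : i ≠ 0 := by
        intro h; subst h; exact hne (by simp)
      rw [if_neg hz0, if_neg hzR]
      unfold SI TI
      rw [if_neg hine, emod_pred_of (2*R-2) i hm0 h1]
      split_ifs <;> omega

lemma SI_succ (R i : Int) (hi : 0 ≤ i) : SI R (i+1) = TI R i := by
  have h : i + 1 ≠ 0 := by omega
  simp [SI, h]

lemma getD_set' (l : List (List Char)) (i : Nat) (v : List Char) (r : Nat) (h : r < l.length) :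
    (l.set i v).getD r [] = if i = r then v else l.getD r [] := by
  rcases Nat.lt_or_ge i l.length with hi | hi
  · rw [List.getD_eq_getElem _ _ (by simpa using h), List.getElem_set,
        List.getD_eq_getElem _ _ h]
  · rw [List.set_eq_of_length_le (by omega)]
    split_ifs with he
    · omega
    · rfl

lemma map_getD_range (l : List (List Char)) :
    (List.range l.length).map (fun r => l.getD r []) = l := by
  apply List.ext_getElem
  · simp
  · intro k h1 h2
    simp only [List.getElem_map, List.getElem_range]
    rw [List.getD_eq_getElem _ _ (by simpa using h2)]

lemma simA (R : Int) (hR : 2 ≤ R) :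
    ∀ (l : List Char) (i : Int), 0 ≤ i →
    ∀ (rows : List (List Char)) (σ : Int), rows.length = R.toNat → σ = SI R i →
    (l.foldl (convertStep R) (rows, zigI R i, σ)).1
      = (List.range R.toNat).map (fun r => rows.getD r [] ++ rowsOf R l i (r : Int)) := by
  intro l
  induction l with
  | nil =>
    intro i hi rows σ hlen hσ
    simp only [List.foldl_nil]
    simp only [rowsOf, List.append_nil]
    rw [← hlen]
    exact (map_getD_range rows).symm
  | cons ch l ih =>
    intro i hi rows σ hlen hσ
    have hzb := zig_bounds R i hR
    have hlt : (zigI R i).toNat < rows.length := by omega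
    have hstep : convertStep R (rows, zigI R i, σ) ch
        = (rows.set (zigI R i).toNat (rows.getD (zigI R i).toNat [] ++ [ch]),
           zigI R (i+1), TI R i) := by
      unfold convertStep
      simp only []
      rw [hσ, step_upd R i hR hi, ← zig_succ R i hR,
          PySem.List.pySetD_of_nonneg rows _ hzb.1,
          PySem.List.pyGetD_eq_getElem rows [] hzb.1 (by exact_mod_cast by omega),
          List.getD_eq_getElem rows [] hlt]
    rw [List.foldl_cons, hstep,
        ih (i+1) (by omega) _ (TI R i) (by simpa using hlen) (SI_succ R i hi).symm]
    apply List.map_congr_left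
    intro r hr
    have hrR : r < R.toNat := List.mem_range.mp hr
    rw [getD_set' rows _ _ r (by omega)]
    rw [show rowsOf R (ch :: l) i (r:Int)
        = (if zigI R i = (r:Int) then [ch] else []) ++ rowsOf R l (i+1) (r:Int) from rfl]
    by_cases h : zigI R i = (r : Int)
    · have hzr : (zigI R i).toNat = r := by omega
      rw [hzr, if_pos rfl, if_pos h, List.append_assoc]
    · rw [if_neg (by omega : ¬ (zigI R i).toNat = r), if_neg h, List.nil_append]

lemma rowsOf_eq (R r : Int) :
    ∀ (l : List Char) (i : Nat),
    rowsOf R l (i : Int) r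
      = (((List.range l.length).filter (fun t : Nat => zigI R ((i : Int) + (t : Int)) == r)).map
          (fun t : Nat => l.getD t ' ')) := by
  intro l
  induction l with
  | nil => intro i; simp [rowsOf]
  | cons ch l ih =>
    intro i
    show (if zigI R i = r then [ch] else []) ++ rowsOf R l ((i:Int)+1) r = _
    have hcast : ((i : Int) + 1) = ((i + 1 : Nat) : Int) := by push_cast; ring
    rw [hcast, ih (i+1)]
    rw [List.length_cons, List.range_succ_eq_map, List.filter_cons, List.filter_map]
    have hp0 : (zigI R ((i:Int) + ((0:Nat):Int)) == r) = (zigI R i == r) := by norm_num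
    have hcomp : ((fun t : Nat => zigI R ((i:Int) + (t:Int)) == r) ∘ Nat.succ)
        = (fun t : Nat => zigI R (((i+1 : Nat):Int) + (t:Int)) == r) := by
      funext t
      simp only [Function.comp_apply]
      congr 2
      push_cast; ring
    rw [hcomp]
    simp only [hp0]
    by_cases h : zigI R i = r
    · simp [h, List.map_map, Function.comp_def]
    · simp [h, List.map_map, Function.comp_def]

lemma zig_base (R r k : Int) (hR : 2 ≤ R) (hr0 : 0 ≤ r) (hr : r < R) (_hk : 0 ≤ k) :
    zigI R (r + (2*R-2)*k) = r := by
  have hm : (r + (2*R-2)*k) % (2*R-2) = r :=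
    emod_uniq (2*R-2) _ r k (by ring) hr0 (by omega)
  unfold zigI; rw [hm]; split_ifs; omega

lemma zig_diag (R r k : Int) (hR : 2 ≤ R) (hr0 : 0 < r) (hr : r < R - 1) (_hk : 0 ≤ k) :
    zigI R (r + (2*R-2)*k + (2*R-2) - 2*r) = r := by
  have hm : (r + (2*R-2)*k + (2*R-2) - 2*r) % (2*R-2) = (2*R-2) - r :=
    emod_uniq (2*R-2) _ ((2*R-2) - r) k (by ring) (by omega) (by omega)
  unfold zigI; rw [hm]; split_ifs <;> omega

lemma zig_inv (R r x : Int) (hR : 2 ≤ R) (_hr0 : 0 ≤ r) (_hr : r < R)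
    (hx : 0 ≤ x) (hz : zigI R x = r) :
    ∃ j : Int, r ≤ j ∧ j ≤ x ∧ (2*R-2) ∣ (j - r) ∧
      (x = j ∨ (0 < r ∧ r < R - 1 ∧ x = j + (2*R-2) - 2*r)) := by
  have hc : (0:Int) < 2*R-2 := by omega
  have h0 := Int.emod_nonneg x (show (2*R-2:Int) ≠ 0 by omega)
  have h1 := Int.emod_lt_of_pos x hc
  have hdec := Int.mul_ediv_add_emod x (2*R-2)
  have hq0 : 0 ≤ x / (2*R-2) := Int.ediv_nonneg hx (by omega)
  have hcq : 0 ≤ (2*R-2) * (x / (2*R-2)) := mul_nonneg (by omega) hq0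
  by_cases hm : x % (2*R-2) < R
  · have hmr : x % (2*R-2) = r := by unfold zigI at hz; rw [if_pos hm] at hz; omega
    refine ⟨x, by omega, le_rfl, ⟨x / (2*R-2), by omega⟩, Or.inl rfl⟩
  · have hmr : x % (2*R-2) = (2*R-2) - r := by
      unfold zigI at hz; rw [if_neg hm] at hz; omega
    refine ⟨x - ((2*R-2) - 2*r), by omega, by omega, ⟨x / (2*R-2), by omega⟩,
      Or.inr ⟨by omega, by omega, by omega⟩⟩

lemma row_eq (R N : Int) (hR : 2 ≤ R) (r : Int) (hr0 : 0 ≤ r) (hr : r < R) :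
    (PySem.List.pyRange r N (2*R-2)).flatMap
        (fun j => j :: if 0 < r ∧ r < R - 1 ∧ j + (2*R-2) - 2*r < N then [j + (2*R-2) - 2*r] else [])
      = ((List.range N.toNat).filter (fun t : Nat => zigI R ((t : Nat) : Int) == r)).map
          (fun t : Nat => ((t : Nat) : Int)) := by
  have hc : (0:Int) < 2*R-2 := by omega
  set blk : Int → List Int := fun j =>
    j :: if 0 < r ∧ r < R - 1 ∧ j + (2*R-2) - 2*r < N then [j + (2*R-2) - 2*r] else [] with hblk
  have hmemblk : ∀ j x : Int, x ∈ blk j ↔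
      (x = j ∨ (0 < r ∧ r < R - 1 ∧ j + (2*R-2) - 2*r < N ∧ x = j + (2*R-2) - 2*r)) := by
    intro j x
    rw [hblk]
    simp only [List.mem_cons]
    split_ifs with h
    · simp only [List.mem_singleton]; tauto
    · simp only [List.not_mem_nil, or_false]; tauto
  -- membership characterization, left side
  have hmemL : ∀ x : Int,
      (x ∈ (PySem.List.pyRange r N (2*R-2)).flatMap blk) ↔ (0 ≤ x ∧ x < N ∧ zigI R x = r) := by
    intro x
    rw [List.mem_flatMap]
    constructor
    · rintro ⟨j, hj, hx⟩
      rw [PySem.List.mem_pyRange_iff_of_pos hc] at hj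
      obtain ⟨hjr, hjN, k, hk⟩ := hj
      have hk0 : 0 ≤ k := by nlinarith [hk, hjr, hc]
      rw [hmemblk] at hx
      rcases hx with rfl | ⟨hrpos, hrlt, hlt, rfl⟩
      · exact ⟨by omega, hjN, by rw [show x = r + (2*R-2)*k by omega]; exact zig_base R r k hR hr0 hr hk0⟩
      · refine ⟨by omega, hlt, ?_⟩
        rw [show j + (2*R-2) - 2*r = r + (2*R-2)*k + (2*R-2) - 2*r by omega]
        exact zig_diag R r k hR hrpos hrlt hk0
    · rintro ⟨hx0, hxN, hz⟩
      obtain ⟨j, hjr, hjx, hdvd, hcase⟩ := zig_inv R r x hR hr0 hr hx0 hz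
      refine ⟨j, ?_, ?_⟩
      · rw [PySem.List.mem_pyRange_iff_of_pos hc]
        exact ⟨hjr, by omega, hdvd⟩
      · rw [hmemblk]
        rcases hcase with rfl | ⟨h1, h2, h3⟩
        · exact Or.inl rfl
        · exact Or.inr ⟨h1, h2, by omega, h3⟩
  -- membership characterization, right side
  have hmemR : ∀ x : Int,
      (x ∈ ((List.range N.toNat).filter (fun t : Nat => zigI R ((t : Nat) : Int) == r)).map
          (fun t : Nat => ((t : Nat) : Int))) ↔ (0 ≤ x ∧ x < N ∧ zigI R x = r) := by
    intro x
    simp only [List.mem_map, List.mem_filter, List.mem_range, beq_iff_eq]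
    constructor
    · rintro ⟨t, ⟨ht, hzt⟩, rfl⟩
      exact ⟨by omega, by omega, hzt⟩
    · rintro ⟨hx0, hxN, hz⟩
      refine ⟨x.toNat, ⟨by omega, ?_⟩, by omega⟩
      rw [show ((x.toNat : Nat) : Int) = x by omega]
      exact hz
  -- pairwise <, left side
  have hpL : ((PySem.List.pyRange r N (2*R-2)).flatMap blk).Pairwise (· < ·) := by
    rw [List.pairwise_flatMap]
    constructor
    · intro j _
      rw [hblk]
      simp only []
      split_ifs with h
      · exact List.pairwise_pair.mpr (by omega)
      · exact List.pairwise_singleton _ _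
    · rw [PySem.List.pyRange_of_pos r N hc]
      rw [List.pairwise_map]
      apply List.Pairwise.imp ?_ (List.pairwise_lt_range)
      intro k1 k2 hk12 x hx y hy
      have hkk : (2*R-2) * (k1:Int) + (2*R-2) ≤ (2*R-2) * (k2:Int) := by
        have h12 : ((k1:Int) + 1) ≤ (k2:Int) := by exact_mod_cast hk12
        calc (2*R-2) * (k1:Int) + (2*R-2) = (2*R-2) * ((k1:Int)+1) := by ring
          _ ≤ (2*R-2) * (k2:Int) := mul_le_mul_of_nonneg_left h12 (by omega)
      rw [hmemblk] at hx hy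
      rcases hx with rfl | ⟨hx1, hx2, _, rfl⟩ <;>
        rcases hy with rfl | ⟨hy1, hy2, _, rfl⟩ <;>
        omega
  -- pairwise <, right side
  have hpR : (((List.range N.toNat).filter (fun t : Nat => zigI R ((t : Nat) : Int) == r)).map
      (fun t : Nat => ((t : Nat) : Int))).Pairwise (· < ·) := by
    rw [List.pairwise_map]
    exact (List.pairwise_lt_range.filter _).imp (fun h => by exact_mod_cast h)
  exact List.Perm.eq_of_pairwise
    (fun a b _ _ h1 h2 => by omega)
    hpL hpR
    (List.perm_of_nodup_nodup_toFinset_eq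
      (hpL.imp (fun h => by omega)) (hpR.imp (fun h => by omega))
      (Finset.ext fun x => by
        simp only [List.mem_toFinset]
        rw [hmemL, hmemR]))

lemma getD_replicate_nil (n r : Nat) : (List.replicate n ([] : List Char)).getD r [] = [] := by
  rcases Nat.lt_or_ge r n with h | h
  · rw [List.getD_eq_getElem _ _ (by simpa using h), List.getElem_replicate]
  · rw [List.getD_eq_getElem?_getD, List.getElem?_eq_none (by simpa using h)]
    rfl

theorem convertsEqual (s : String) (numRows : Int) (hpre : 1 ≤ numRows ∨ s = "") :
    convert s numRows = convert_alt s numRows := by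
  simp only [convert, convert_alt]
  by_cases hg : (numRows == 1 || decide ((PySem.Str.len s : Int) ≤ numRows)) = true
  · rw [if_pos hg, if_pos hg]
  · rw [if_neg hg, if_neg hg]
    simp only [beq_iff_eq, Bool.or_eq_true, decide_eq_true_eq, not_or] at hg
    obtain ⟨hg1, hg2⟩ := hg
    rw [PySem.Str.len_eq] at hg2
    by_cases hnil : s.toList = []
    · -- s is empty but numRows < 0 : both sides produce ""
      have hneg : numRows < 0 := by
        rw [hnil] at hg2; simp at hg2; omega
      rw [hnil]
      simp only [List.foldl_nil]
      rw [PySem.List.pyRange_one_eq_nil (by omega)]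
      simp only [List.foldl_nil]
      congr 1
      rw [PySem.List.pyRepeat_singleton]
      have : numRows.toNat = 0 := by omega
      rw [this]
      rfl
    · -- main case: 2 ≤ numRows < len s
      have hn1 : 1 ≤ s.toList.length := by
        cases h : s.toList with
        | nil => exact absurd h hnil
        | cons a l => simp
      have hR2 : 2 ≤ numRows := by
        rcases hpre with h | h
        · omega
        · exact absurd (by rw [h]; rfl) hnil
      have hRn : numRows < (s.toList.length : Int) := by omega
      congr 1
      -- A side
      have hz0 : zigI numRows 0 = 0 := by
        unfold zigI; rw [Int.zero_emod, if_pos (by omega)]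
      have hs0 : SI numRows 0 = 1 := by simp [SI]
      rw [show ((PySem.List.pyRepeat [([] : List Char)] numRows : List (List Char)), (0:Int), (1:Int))
            = (List.replicate numRows.toNat [], zigI numRows 0, SI numRows 0) from by
          rw [PySem.List.pyRepeat_singleton, hz0, hs0]]
      rw [simA numRows hR2 s.toList 0 le_rfl _ _ (by simp) rfl]
      have hA : (List.range numRows.toNat).map
            (fun r => (List.replicate numRows.toNat ([]:List Char)).getD r [] ++ rowsOf numRows s.toList 0 (r:Int))
          = (List.range numRows.toNat).map (fun r : Nat => rowsOf numRows s.toList 0 (r:Int)) := by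
        apply List.map_congr_left
        intro r _
        rw [getD_replicate_nil, List.nil_append]
      rw [hA]
      -- B side: two nested appending folds become a flatMap of a flatMap
      set cyc : Int := 2 * numRows - 2 with hcyc
      set n : Int := PySem.Str.len s with hn
      have hnn : n = (s.toList.length : Int) := by rw [hn, PySem.Str.len_eq]
      have hinner : ∀ (r : Int) (acc : List Char),
          (PySem.List.pyRange r n cyc).foldl (fun acc j =>
            (if 0 < r ∧ r < numRows - 1 ∧ j + cyc - 2*r < n
              then (acc ++ [PySem.List.pyGetD s.toList j ' ']) ++ [PySem.List.pyGetD s.toList (j + cyc - 2*r) ' ']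
              else acc ++ [PySem.List.pyGetD s.toList j ' '])) acc
          = acc ++ (PySem.List.pyRange r n cyc).flatMap (fun j =>
              PySem.List.pyGetD s.toList j ' ' ::
                (if 0 < r ∧ r < numRows - 1 ∧ j + cyc - 2*r < n
                  then [PySem.List.pyGetD s.toList (j + cyc - 2*r) ' '] else [])) := by
        intro r acc
        rw [PySem.List.foldl_congr_mem _ _
            (fun acc j => acc ++ (PySem.List.pyGetD s.toList j ' ' ::
              (if 0 < r ∧ r < numRows - 1 ∧ j + cyc - 2*r < n
                then [PySem.List.pyGetD s.toList (j + cyc - 2*r) ' '] else []))) _ ?_]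
        · exact PySem.List.foldl_append_eq_flatMap _ _ _
        · intro acc j _
          split_ifs with h <;> simp [h]
      obtain ⟨K, hK⟩ : ∃ K : Nat, numRows = (K : Int) := ⟨numRows.toNat, by omega⟩
      have houter : List.foldl (fun acc r => List.foldl (fun acc j =>
            let acc := acc ++ [PySem.List.pyGetD s.toList j ' '];
            let d := j + cyc - 2*r;
            if 0 < r ∧ r < numRows - 1 ∧ d < n then acc ++ [PySem.List.pyGetD s.toList d ' '] else acc)
            acc (PySem.List.pyRange r n cyc)) [] (PySem.List.pyRange 0 numRows 1)
          = (PySem.List.pyRange 0 numRows 1).flatMap (fun r => (PySem.List.pyRange r n cyc).flatMap (fun j =>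
              PySem.List.pyGetD s.toList j ' ' ::
                (if 0 < r ∧ r < numRows - 1 ∧ j + cyc - 2*r < n
                  then [PySem.List.pyGetD s.toList (j + cyc - 2*r) ' '] else []))) := by
        refine Eq.trans (PySem.List.foldl_congr_mem _ _
          (fun acc r => acc ++ (PySem.List.pyRange r n cyc).flatMap (fun j =>
              PySem.List.pyGetD s.toList j ' ' ::
                (if 0 < r ∧ r < numRows - 1 ∧ j + cyc - 2*r < n
                  then [PySem.List.pyGetD s.toList (j + cyc - 2*r) ' '] else []))) _ ?_) ?_
        · intro acc r _
          exact hinner r acc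
        · exact (PySem.List.foldl_append_eq_flatMap _ _ _).trans (by simp)
      rw [houter]
      rw [hK, PySem.List.pyRange_zero_natCast K, List.flatMap_map]
      rw [List.flatten_eq_flatMap]
      simp only [Int.toNat_natCast]
      rw [List.flatMap_map]
      apply List.flatMap_congr
      intro r hr
      have hrK : r < K := List.mem_range.mp hr
      simp only [id_eq]
      rw [show rowsOf (↑K) s.toList 0 (↑r) = rowsOf (↑K) s.toList (((0:Nat)):Int) (↑r) by norm_num,
          rowsOf_eq (↑K) (↑r) s.toList 0]
      have hfix : (fun t : Nat => zigI (↑K) (((0:Nat):Int) + (t:Int)) == ((r:Nat):Int))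
          = (fun t : Nat => zigI (↑K) ((t:Nat):Int) == ((r:Nat):Int)) := by
        funext t; norm_num
      rw [hfix]
      have hmapped : (PySem.List.pyRange (↑r) n cyc).flatMap (fun j =>
            PySem.List.pyGetD s.toList j ' ' ::
              (if 0 < (r:Int) ∧ (r:Int) < (K:Int) - 1 ∧ j + cyc - 2*(r:Int) < n
                then [PySem.List.pyGetD s.toList (j + cyc - 2*(r:Int)) ' '] else []))
          = ((PySem.List.pyRange (↑r) n cyc).flatMap (fun j =>
              j :: (if 0 < (r:Int) ∧ (r:Int) < (K:Int) - 1 ∧ j + cyc - 2*(r:Int) < n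
                then [j + cyc - 2*(r:Int)] else []))).map (fun x => PySem.List.pyGetD s.toList x ' ') := by
        rw [List.map_flatMap]
        apply List.flatMap_congr
        intro j _
        simp only [List.map_cons, apply_ite (List.map (fun x => PySem.List.pyGetD s.toList x ' ')),
          List.map_cons, List.map_nil]
      rw [hmapped, hcyc, hK, hnn]
      rw [row_eq (↑K) (↑s.toList.length) (by omega) (↑r) (by positivity) (by exact_mod_cast by omega)]
      rw [List.map_map]
      simp only [Int.toNat_natCast]
      apply List.map_congr_left
      intro t _
      simp [PySem.List.pyGetD_natCast]

-- ===== VERDICT (by name: the statement is the Claim_ definition above) =====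
theorem convert_spec : Claim_equal_convert := by
  intro s numRows _ hpre
  unfold Spec_convert
  exact convertsEqual s numRows hpre
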